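-- pv_equiv track=rewrite | github.com/eugene-eeo/midas | ii.py | guess_event
-- ===== SOURCE A (Python) =====
-- def guess_event(data):
--     if data:
--         y_data = [y for t,y in data if t == 0]
--         c_data = [y for t,y in data if t == 1]
--         if not c_data:
--             return
--         up = 0
--         down = 0
--         for i in range(len(y_data) - 4):
--             chunk = y_data[i:i+4]
--             seen_up   = False
--             seen_down = False
--             for i, a in enumerate(chunk):
--                 if i < 3:
--                     b = chunk[i+1]
--                     seen_up   |= b < a
--                     seen_down |= b > a
--             # if we cannot agree then screw it
--             # forget about this chunk
--             if seen_up and seen_down: continue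
--             if seen_up: up += 1
--             else:       down += 1
--         return max(c_data), 0 if up > down else 1
--     return
-- ===== SOURCE B (Python) =====
-- def guess_event(data):
--     if not data:
--         return None
--     y = [v for t, v in data if t == 0]
--     c = [v for t, v in data if t == 1]
--     if not c:
--         return None
--     # Streak / run-length counting instead of sliding windows: a window of three
--     # adjacent steps is "up" iff it has a fall and no rise, "down" iff it has no
--     # fall.  Count, in one pass over the steps, how many length-3 runs consist of
--     # non-rising steps (cnr), of non-falling steps (cnf) and of flat steps (cnz),
--     # by maintaining the current streak length of each kind.
--     nr = nf = nz = 0      # current streak lengths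
--     cnr = cnf = cnz = 0   # completed length-3-window counts
--     for j in range(len(y) - 2):
--         fall = y[j + 1] < y[j]
--         rise = y[j + 1] > y[j]
--         nr = 0 if rise else nr + 1
--         nf = 0 if fall else nf + 1
--         nz = 0 if (rise or fall) else nz + 1
--         if nr >= 3:
--             cnr += 1
--         if nf >= 3:
--             cnf += 1
--         if nz >= 3:
--             cnz += 1
--     up = cnr - cnz        # no-rise windows that are not all flat, i.e. contain a fall
--     down = cnf            # windows with no fall
--     return max(c), 0 if up > down else 1
-- ===== Notes on version B (the rewrite author's own statement) =====
-- stated objective: alternative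
-- what changed: B replaces A's sliding 4-element window with per-window chunk slicing and an inner enumerate loop by run-length (streak) counting: one pass over the adjacent steps maintains the current streak lengths of non-rising, non-falling and flat steps and counts completed length-3 runs, from which the up/down window counts are recovered arithmetically (up = no-rise runs minus all-flat runs).
import Mathlib
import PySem

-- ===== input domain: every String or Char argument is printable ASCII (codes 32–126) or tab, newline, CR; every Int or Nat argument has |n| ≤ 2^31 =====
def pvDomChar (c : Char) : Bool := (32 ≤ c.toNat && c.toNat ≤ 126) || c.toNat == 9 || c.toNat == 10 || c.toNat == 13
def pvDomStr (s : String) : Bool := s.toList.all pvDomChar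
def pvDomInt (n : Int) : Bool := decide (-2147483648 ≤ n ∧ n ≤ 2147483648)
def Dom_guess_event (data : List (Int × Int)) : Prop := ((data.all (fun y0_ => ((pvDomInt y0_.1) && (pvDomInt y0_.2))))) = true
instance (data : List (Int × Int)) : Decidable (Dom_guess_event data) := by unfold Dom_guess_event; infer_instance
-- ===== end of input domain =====

-- B replaces A's sliding-window loop (per-window chunk slice + inner enumerate scan) by a single
-- run-length pass that maintains streak lengths of non-rising / non-falling / flat steps and counts
-- completed length-3 runs; objective: alternative.

-- ===== PORT A =====
-- inner loop body over enumerate(chunk): accumulates (seen_up, seen_down)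
def aInner (chunk : List Int) (s : Bool × Bool) (ia : Int × Int) : Bool × Bool :=
  if ia.1 < 3 then
    -- chunk[i+1]: always in range here (chunk has 4 elements and i < 3)
    let b := PySem.List.pyGetD chunk (ia.1 + 1) 0
    (s.1 || decide (b < ia.2), s.2 || decide (b > ia.2))
  else s

-- outer loop body: one window starting at i
def aStep (y_data : List Int) (ud : Int × Int) (i : Int) : Int × Int :=
  let chunk := PySem.List.slice y_data (some i) (some (i + 4))
  let s := (PySem.List.enumerate chunk 0).foldl (aInner chunk) (false, false)
  if s.1 && s.2 then ud
  else if s.1 then (ud.1 + 1, ud.2)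
  else (ud.1, ud.2 + 1)

def guess_event (data : List (Int × Int)) : Option (Int × Int) :=
  if data ≠ [] then
    let y_data := (data.filter (fun ty => ty.1 == 0)).map (fun ty => ty.2)
    let c_data := (data.filter (fun ty => ty.1 == 1)).map (fun ty => ty.2)
    if c_data = [] then none
    else
      let ud := (PySem.List.pyRange 0 ((y_data.length : Int) - 4) 1).foldl (aStep y_data) (0, 0)
      match PySem.List.max? c_data (fun v => v) with
      | some m => some (m, if ud.1 > ud.2 then 0 else 1)
      | none => none
  else none

-- ===== PORT B =====
-- state (nr, nf, nz, cnr, cnf, cnz): current streak lengths and completed length-3-run counts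
def bStep (y : List Int) (st : Int × Int × Int × Int × Int × Int) (j : Int) :
    Int × Int × Int × Int × Int × Int :=
  let fall := PySem.List.pyGetD y (j + 1) 0 < PySem.List.pyGetD y j 0
  let rise := PySem.List.pyGetD y j 0 < PySem.List.pyGetD y (j + 1) 0
  let nr := if rise then 0 else st.1 + 1
  let nf := if fall then 0 else st.2.1 + 1
  let nz := if rise ∨ fall then 0 else st.2.2.1 + 1
  let cnr := if nr ≥ 3 then st.2.2.2.1 + 1 else st.2.2.2.1
  let cnf := if nf ≥ 3 then st.2.2.2.2.1 + 1 else st.2.2.2.2.1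
  let cnz := if nz ≥ 3 then st.2.2.2.2.2 + 1 else st.2.2.2.2.2
  (nr, nf, nz, cnr, cnf, cnz)

def guess_event_alt (data : List (Int × Int)) : Option (Int × Int) :=
  if data = [] then none
  else
    let y := (data.filter (fun ty => ty.1 == 0)).map (fun ty => ty.2)
    let c := (data.filter (fun ty => ty.1 == 1)).map (fun ty => ty.2)
    if c = [] then none
    else
      let st := (PySem.List.pyRange 0 ((y.length : Int) - 2) 1).foldl (bStep y) (0, 0, 0, 0, 0, 0)
      let up := st.2.2.2.1 - st.2.2.2.2.2
      let down := st.2.2.2.2.1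
      match PySem.List.max? c (fun v => v) with
      | some m => some (m, if up > down then 0 else 1)
      | none => none

-- ===== PRECONDITION & SPEC =====
def Spec_guess_event (data : List (Int × Int)) (out : Option (Int × Int)) : Prop := out = guess_event_alt data
instance (data : List (Int × Int)) (out : Option (Int × Int)) : Decidable (Spec_guess_event data out) := by unfold Spec_guess_event; infer_instance

-- ===== CLAIM (what is proved, stated in full; the proofs are below) =====
def Claim_equal_guess_event : Prop := ∀ (data : List (Int × Int)), Dom_guess_event data → Spec_guess_event data (guess_event data)

-- ===== LEMMAS AND PROOFS =====

-- step predicates over the y-list (total via getD; read only in-range in both loops)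
def riseAt (y : List Int) (j : Nat) : Bool := decide (y.getD j 0 < y.getD (j + 1) 0)
def fallAt (y : List Int) (j : Nat) : Bool := decide (y.getD (j + 1) 0 < y.getD j 0)
def prB (y : List Int) (j : Nat) : Bool := !riseAt y j
def pfB (y : List Int) (j : Nat) : Bool := !fallAt y j
def pzB (y : List Int) (j : Nat) : Bool := !(riseAt y j || fallAt y j)
-- a length-3 window of steps starting at k, all satisfying p
def winP (p : Nat → Bool) (k : Nat) : Bool := p k && p (k + 1) && p (k + 2)
-- streak length: number of trailing positions < m satisfying p
def strk (p : Nat → Bool) : Nat → Nat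
  | 0 => 0
  | m + 1 => if p m then strk p m + 1 else 0

lemma strk_le (p : Nat → Bool) (m : Nat) : strk p m ≤ m := by
  induction m with
  | zero => simp [strk]
  | succ k ih => simp only [strk]; split_ifs <;> omega

lemma strk_ge3 (p : Nat → Bool) (k : Nat) :
    3 ≤ strk p (k + 3) ↔ (p k && p (k + 1) && p (k + 2)) = true := by
  have h := strk_le p k
  simp only [strk]
  split_ifs <;> simp_all

-- count update: windows completed by step m (the window k = m-2) appear exactly when the new streak ≥ 3
lemma count_step (p : Nat → Bool) (m : Nat) :
    (((List.range (m + 1 - 2)).countP (winP p) : Nat) : Int)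
      = ((List.range (m - 2)).countP (winP p) : Int)
        + (if (3 : Int) ≤ (strk p (m + 1) : Int) then 1 else 0) := by
  match m with
  | 0 =>
    have := strk_le p 1
    rw [show (0:Nat) + 1 = 1 from rfl, if_neg (by omega)]; simp
  | 1 =>
    have := strk_le p 2
    rw [show (1:Nat) + 1 = 2 from rfl, if_neg (by omega)]; simp
  | (k + 2) =>
    simp only [show k + 2 + 1 - 2 = k + 1 from rfl, show k + 2 - 2 = k from rfl,
      show k + 2 + 1 = k + 3 from rfl]
    rw [List.range_succ, List.countP_append]
    by_cases hw : (winP p k) = true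
    · rw [if_pos (by exact_mod_cast (strk_ge3 p k).2 (by simpa [winP] using hw))]
      simp [hw]
    · rw [if_neg (fun h3 => hw (by simpa [winP] using (strk_ge3 p k).1 (by exact_mod_cast h3)))]
      simp [hw]

-- ---------- B side ----------

-- B's loop body at a natural index, in terms of the step predicates
lemma bStep_eval (y : List Int) (st : Int × Int × Int × Int × Int × Int) (j : Nat) :
    bStep y st (j : Int)
      = (if riseAt y j then 0 else st.1 + 1,
         if fallAt y j then 0 else st.2.1 + 1,
         if riseAt y j || fallAt y j then 0 else st.2.2.1 + 1,
         if 3 ≤ (if riseAt y j then 0 else st.1 + 1) then st.2.2.2.1 + 1 else st.2.2.2.1,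
         if 3 ≤ (if fallAt y j then 0 else st.2.1 + 1) then st.2.2.2.2.1 + 1 else st.2.2.2.2.1,
         if 3 ≤ (if riseAt y j || fallAt y j then 0 else st.2.2.1 + 1) then st.2.2.2.2.2 + 1 else st.2.2.2.2.2) := by
  simp only [bStep, riseAt, fallAt,
    show ((j : Int) + 1) = (((j + 1 : Nat)) : Int) by push_cast; ring,
    PySem.List.pyGetD_natCast, ge_iff_le, decide_eq_true_eq, Bool.or_eq_true]

-- the streak fields and counters after m steps of B's loop
lemma bLoop (y : List Int) (m : Nat) :
    (List.range m).foldl (fun st (k : Nat) => bStep y st (k : Int)) (0, 0, 0, 0, 0, 0)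
      = ((strk (prB y) m : Int), (strk (pfB y) m : Int), (strk (pzB y) m : Int),
         ((List.range (m - 2)).countP (winP (prB y)) : Int),
         ((List.range (m - 2)).countP (winP (pfB y)) : Int),
         ((List.range (m - 2)).countP (winP (pzB y)) : Int)) := by
  induction m with
  | zero => simp [strk]
  | succ m ih =>
    rw [List.range_succ, List.foldl_append, ih]
    simp only [List.foldl_cons, List.foldl_nil, bStep_eval]
    have hr : (if riseAt y m then (0:Int) else (strk (prB y) m : Int) + 1)
        = (strk (prB y) (m + 1) : Int) := by
      simp only [strk, prB]
      rcases Bool.eq_false_or_eq_true (riseAt y m) with h | h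
      · simp [h]
      · simp [h]
    have hf : (if fallAt y m then (0:Int) else (strk (pfB y) m : Int) + 1)
        = (strk (pfB y) (m + 1) : Int) := by
      simp only [strk, pfB]
      rcases Bool.eq_false_or_eq_true (fallAt y m) with h | h
      · simp [h]
      · simp [h]
    have hz : (if riseAt y m || fallAt y m then (0:Int) else (strk (pzB y) m : Int) + 1)
        = (strk (pzB y) (m + 1) : Int) := by
      simp only [strk, pzB]
      rcases Bool.eq_false_or_eq_true ((riseAt y m || fallAt y m)) with h | h
      · simp [h]
      · simp [h]
    rw [hr, hf, hz, count_step (prB y) m, count_step (pfB y) m, count_step (pzB y) m]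
    split_ifs <;> simp

-- ---------- A side ----------

-- a 4-element slice written out
lemma slice4 (y : List Int) (k : Nat) (h : k + 4 ≤ y.length) :
    PySem.List.slice y (some (k : Int)) (some ((k : Int) + 4))
      = [y[k]'(by omega), y[k+1]'(by omega), y[k+2]'(by omega), y[k+3]'(by omega)] := by
  rw [show ((k : Int) + 4) = ((k : Int) + ((4 : Nat) : Int)) by norm_num,
    PySem.List.slice_natCast_add]
  apply List.ext_getElem
  · simp; omega
  · intro i hi1 hi2
    have hi4 : i < 4 := by simpa using hi2
    simp only [List.getElem_take, List.getElem_drop]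
    interval_cases i <;> simp

-- one window of A: the two counters gain the window-classification indicators
lemma aStep_eval (y : List Int) (u d : Int) (k : Nat) (hk : k + 4 ≤ y.length) :
    aStep y (u, d) (k : Int)
      = (u + (if (winP (prB y) k && !winP (pfB y) k) = true then 1 else 0),
         d + (if winP (pfB y) k = true then 1 else 0)) := by
  unfold aStep
  rw [slice4 y k hk]
  simp only [PySem.List.enumerate_cons, PySem.List.enumerate_nil, List.foldl_cons, List.foldl_nil,
    aInner]
  norm_num [pysem]
  simp only [show Int.toNat 2 = 2 from rfl, show Int.toNat 3 = 3 from rfl,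
    List.getElem_cons_succ, List.getElem_cons_zero]
  simp only [winP, prB, pfB, riseAt, fallAt,
    List.getD_eq_getElem y 0 (show k < y.length by omega),
    List.getD_eq_getElem y 0 (show k + 1 < y.length by omega),
    List.getD_eq_getElem y 0 (show k + 2 < y.length by omega),
    List.getD_eq_getElem y 0 (show k + 3 < y.length by omega),
    show k + 1 + 1 = k + 2 from rfl, show k + 2 + 1 = k + 3 from rfl]
  split_ifs <;> simp_all <;> omega

-- A's loop counts the up- and down-windows
lemma aLoop (y : List Int) (m : Nat) (hm : m ≤ y.length - 4) :
    (List.range m).foldl (fun ud (k : Nat) => aStep y ud (k : Int)) (0, 0)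
      = (((List.range m).countP (fun k => winP (prB y) k && !winP (pfB y) k) : Int),
         ((List.range m).countP (winP (pfB y)) : Int)) := by
  induction m with
  | zero => simp
  | succ m ih =>
    rw [List.range_succ, List.foldl_append, ih (by omega)]
    simp only [List.foldl_cons, List.foldl_nil]
    rw [aStep_eval y _ _ m (by omega)]
    rw [List.countP_append, List.countP_append]
    by_cases h1 : (winP (prB y) m && !winP (pfB y) m) = true <;>
      by_cases h2 : winP (pfB y) m = true <;> simp_all

-- pointwise: a flat window is exactly a no-rise and no-fall window
lemma win_pz (y : List Int) (k : Nat) :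
    winP (pzB y) k = (winP (prB y) k && winP (pfB y) k) := by
  simp only [winP, pzB, prB, pfB]
  cases riseAt y k <;> cases fallAt y k <;> cases riseAt y (k + 1) <;> cases fallAt y (k + 1) <;>
    cases riseAt y (k + 2) <;> cases fallAt y (k + 2) <;> rfl

-- counting arithmetic: #(q ∧ ¬r) = #q − #(q ∧ r)
lemma countP_sub {α : Type} (l : List α) (q r : α → Bool) :
    ((l.countP (fun x => q x && !r x) : Nat) : Int)
      = (l.countP q : Int) - (l.countP (fun x => q x && r x) : Int) := by
  induction l with
  | nil => simp
  | cons x l ih =>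
    simp only [List.countP_cons]
    cases hq : q x <;> cases hr : r x <;> simp_all <;> omega

-- ===== VERDICT (by name: the statement is the Claim_ definition above) =====
theorem guess_event_spec : Claim_equal_guess_event := by
  intro data _
  unfold Spec_guess_event guess_event guess_event_alt
  by_cases hd : data = []
  · simp [hd]
  simp only [hd, if_neg, ne_eq, not_false_eq_true, if_true]
  set y := (data.filter (fun ty => ty.1 == 0)).map (fun ty => ty.2) with hy
  set c := (data.filter (fun ty => ty.1 == 1)).map (fun ty => ty.2) with hc
  by_cases hce : c = []
  · simp [hce]
  simp only [hce, if_neg, not_false_eq_true]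
  rw [PySem.List.pyRange_one, PySem.List.pyRange_one, List.foldl_map, List.foldl_map]
  simp only [Int.sub_zero, Int.zero_add]
  rw [aLoop y (((y.length : Int) - 4).toNat) (by omega), bLoop y (((y.length : Int) - 2).toNat)]
  have hMM : ((y.length : Int) - 2).toNat - 2 = ((y.length : Int) - 4).toNat := by omega
  rw [hMM]
  rw [countP_sub (List.range (((y.length : Int) - 4).toNat)) (winP (prB y)) (winP (pfB y))]
  have hzz : (List.range (((y.length : Int) - 4).toNat)).countP (winP (pzB y))
      = (List.range (((y.length : Int) - 4).toNat)).countP (fun k => winP (prB y) k && winP (pfB y) k) := by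
    apply List.countP_congr
    intro k _
    simp [win_pz]
  rw [hzz]
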